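-- pv_equiv track=rewrite | github.com/saifulrony/nextpanel-bill | billing-backend/app/core/license_security.py | validate_license_structure
-- ===== SOURCE A (Python) =====
-- def validate_license_structure(license_key: str) -> bool:
--     """
--     Validate license key format and structure
--     Returns False if key appears tampered with
--     """
--     if not license_key or not isinstance(license_key, str):
--         return False
--
--     # Check format: NP-XXXX-XXXX-XXXX-XXXX
--     parts = license_key.split('-')
--     if len(parts) != 5 or parts[0] != 'NP':
--         return False
--
--     # Check segment format
--     valid_chars = set('ABCDEFGHJKLMNPQRSTUVWXYZ23456789')
--     for segment in parts[1:]: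
--         if len(segment) != 4:
--             return False
--         if not all(c in valid_chars for c in segment):
--             return False
--
--     return True
-- ===== SOURCE B (Python) =====
-- def validate_license_structure(license_key: str) -> bool:
--     """
--     Validate license key format and structure
--     Returns False if key appears tampered with
--     """
--     if not license_key or not isinstance(license_key, str):
--         return False
--
--     # Fixed-shape positional check: NP-XXXX-XXXX-XXXX-XXXX is exactly 22
--     # characters; positions 2,7,12,17 (i % 5 == 2) are '-', the rest of
--     # positions 2..21 are segment characters.
--     valid_chars = set('ABCDEFGHJKLMNPQRSTUVWXYZ23456789')
--     return (len(license_key) == 22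
--             and license_key[0] == 'N'
--             and license_key[1] == 'P'
--             and all(license_key[i] == '-' if i % 5 == 2 else license_key[i] in valid_chars
--                     for i in range(2, 22)))
-- ===== Notes on version B (the rewrite author's own statement) =====
-- stated objective: alternative
-- what changed: Replaces dash-splitting plus per-segment length/character loops with a single positional check of the fixed 22-character pattern (a dash exactly where i % 5 == 2, segment alphabet characters elsewhere).
import Mathlib
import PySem

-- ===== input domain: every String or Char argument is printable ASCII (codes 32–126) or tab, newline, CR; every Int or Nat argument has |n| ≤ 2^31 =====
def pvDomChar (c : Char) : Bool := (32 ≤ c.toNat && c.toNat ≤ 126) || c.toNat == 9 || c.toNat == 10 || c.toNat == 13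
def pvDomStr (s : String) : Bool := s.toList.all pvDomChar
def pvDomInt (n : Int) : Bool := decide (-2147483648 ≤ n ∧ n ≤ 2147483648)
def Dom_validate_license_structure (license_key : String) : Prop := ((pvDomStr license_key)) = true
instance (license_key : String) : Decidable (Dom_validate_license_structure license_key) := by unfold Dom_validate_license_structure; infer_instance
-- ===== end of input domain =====

-- B replaces A's split-into-segments loops by a single positional check of the fixed-length
-- pattern (length 22, dashes where i % 5 == 2, segment characters elsewhere); objective: alternative.

-- ===== PORT A =====
def validate_license_structure (license_key : String) : Bool :=
  -- 'if not license_key': empty-string falsiness (non-str inputs do not exist under the type convention)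
  if license_key.toList.isEmpty then false
  else
    let parts := PySem.Chars.splitOn license_key.toList ['-']
    if parts.length != 5 || PySem.List.pyGet? parts 0 != some ['N', 'P'] then false
    else
      let valid_chars : PySem.Set Char := PySem.Set.ofList "ABCDEFGHJKLMNPQRSTUVWXYZ23456789".toList
      -- for-loop with early 'return False' over parts[1:]: all segments pass both checks
      (PySem.List.slice parts (some 1) none).all fun segment =>
        if segment.length != 4 then false
        else segment.all fun c => valid_chars.contains c

-- ===== PORT B =====
def validate_license_structure_alt (license_key : String) : Bool :=
  let cs := license_key.toList
  if cs.isEmpty then false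
  else
    let valid_chars : PySem.Set Char := PySem.Set.ofList "ABCDEFGHJKLMNPQRSTUVWXYZ23456789".toList
    cs.length == 22 &&
    PySem.List.pyGet? cs 0 == some 'N' &&
    PySem.List.pyGet? cs 1 == some 'P' &&
    (PySem.List.pyRange 2 22 1).all fun i =>
      if PySem.Int.mod i 5 == 2 then PySem.List.pyGet? cs i == some '-'
      else (PySem.List.pyGet? cs i).any fun c => valid_chars.contains c

-- ===== PRECONDITION & SPEC =====
def Spec_validate_license_structure (license_key : String) (out : Bool) : Prop := out = validate_license_structure_alt license_key
instance (license_key : String) (out : Bool) : Decidable (Spec_validate_license_structure license_key out) := by unfold Spec_validate_license_structure; infer_instance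

-- ===== CLAIM (what is proved, stated in full; the proofs are below) =====
def Claim_equal_validate_license_structure : Prop := ∀ (license_key : String), Dom_validate_license_structure license_key → Spec_validate_license_structure license_key (validate_license_structure license_key)

-- ===== LEMMAS AND PROOFS =====

def sSplit : List Char → List Char × List (List Char)
  | [] => ([], [])
  | c :: t =>
    let p := sSplit t
    if c = '-' then ([], p.1 :: p.2) else (c :: p.1, p.2)

lemma go_eq (l : List Char) : ∀ (fuel : Nat) (cur : List Char) (acc : List (List Char)),
    l.length < fuel →
    PySem.Chars.splitOn.go ['-'] fuel l cur acc
      = acc.reverse ++ ((cur.reverse ++ (sSplit l).1) :: (sSplit l).2) := by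
  induction l with
  | nil =>
    intro fuel cur acc h
    cases fuel with
    | zero => omega
    | succ f => simp [PySem.Chars.splitOn.go, sSplit]
  | cons c t ih =>
    intro fuel cur acc h
    cases fuel with
    | zero => simp at h
    | succ f =>
      rw [PySem.Chars.splitOn.go]
      by_cases hc : c = '-'
      · subst hc
        simp only [List.isPrefixOf, List.length, List.drop, beq_self_eq_true, Bool.and_true, if_pos]
        rw [ih f [] (cur.reverse :: acc) (by simp at h; omega)]
        simp [sSplit]
      · have hpre : List.isPrefixOf ['-'] (c :: t) = false := by
          simp [List.isPrefixOf]; exact fun hh => hc hh.symm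
        rw [hpre]
        simp only [Bool.false_eq_true, if_neg, not_false_iff]
        rw [ih f (c :: cur) acc (by simp at h ⊢; omega)]
        simp [sSplit, hc]

lemma splitOn_eq (cs : List Char) :
    PySem.Chars.splitOn cs ['-'] = (sSplit cs).1 :: (sSplit cs).2 := by
  rw [PySem.Chars.splitOn, go_eq cs (cs.length + 1) [] [] (by omega)]
  simp

lemma sSplit_join (cs : List Char) :
    cs = (sSplit cs).1 ++ ((sSplit cs).2.map (fun g => '-' :: g)).flatten := by
  induction cs with
  | nil => simp [sSplit]
  | cons c t ih =>
    by_cases hc : c = '-'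
    · subst hc; simp [sSplit]; exact ih
    · simp [sSplit, hc]; exact ih

lemma sSplit_append (g rest : List Char) (h : ∀ c ∈ g, c ≠ '-') :
    sSplit (g ++ rest) = (g ++ (sSplit rest).1, (sSplit rest).2) := by
  induction g with
  | nil => simp
  | cons c t ih =>
    have hc : c ≠ '-' := h c (by simp)
    simp [sSplit, hc, ih (fun x hx => h x (by simp [hx]))]

lemma valid_ne_dash {c : Char}
    (h : (PySem.Set.ofList "ABCDEFGHJKLMNPQRSTUVWXYZ23456789".toList).contains c = true) :
    c ≠ '-' := by
  intro hc; subst hc; revert h; decide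

def GoodSeg (g : List Char) : Prop :=
  g.length = 4 ∧ ∀ c ∈ g, (PySem.Set.ofList "ABCDEFGHJKLMNPQRSTUVWXYZ23456789".toList).contains c = true

def Shape (cs : List Char) : Prop :=
  ∃ gs : List (List Char),
    cs = ['N', 'P'] ++ (gs.map (fun g => '-' :: g)).flatten ∧ gs.length = 4 ∧ ∀ g ∈ gs, GoodSeg g

lemma sSplit_flat (gs : List (List Char)) (hg : ∀ g ∈ gs, ∀ c ∈ g, c ≠ '-') :
    sSplit ((gs.map (fun g => '-' :: g)).flatten) = ([], gs) := by
  induction gs with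
  | nil => simp [sSplit]
  | cons g rest ih =>
    simp only [List.map_cons, List.flatten_cons, List.cons_append]
    simp only [sSplit]
    rw [sSplit_append g _ (hg g (by simp)), ih (fun x hx => hg x (by simp [hx]))]
    simp

lemma pyGet?_cons_zero {α : Type} (x : α) (xs : List α) : PySem.List.pyGet? (x :: xs) 0 = some x := by
  simp [pysem]

lemma A_iff (s : String) : validate_license_structure s = true ↔ Shape s.toList := by
  rcases hsp : sSplit s.toList with ⟨p, r⟩
  have hjoin := sSplit_join s.toList
  rw [hsp] at hjoin
  simp only at hjoin
  unfold validate_license_structure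
  simp only [splitOn_eq, hsp, PySem.List.slice_from_one, pyGet?_cons_zero, List.length_cons,
    List.tail_cons]
  constructor
  · intro h
    rcases hcs : s.toList with _ | ⟨c, t⟩
    · rw [hcs] at h; simp at h
    · rw [hcs] at h
      simp only [List.isEmpty_cons, Bool.false_eq_true, if_false] at h
      by_cases hguard : ((r.length + 1 != 5 || (some p : Option (List Char)) != some ['N', 'P']) = true)
      · rw [if_pos hguard] at h; exact absurd h (by simp)
      · rw [if_neg hguard] at h
        rw [Bool.or_eq_true, not_or, bne_iff_ne, bne_iff_ne] at hguard
        obtain ⟨hlen, hNP⟩ := hguard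
        simp only [ne_eq, not_not, Option.some.injEq] at hlen hNP
        refine ⟨r, by rw [← hcs, hjoin, hNP], by omega, ?_⟩
        intro g hg
        rw [List.all_eq_true] at h
        have hseg := h g hg
        by_cases h4 : (g.length != 4) = true
        · rw [if_pos h4] at hseg; exact absurd hseg (by simp)
        · rw [if_neg h4] at hseg
          rw [bne_iff_ne, ne_eq, not_not] at h4
          exact ⟨h4, List.all_eq_true.mp hseg⟩
  · rintro ⟨gs, hcs, hlen4, hgood⟩
    have hne : ∀ g ∈ gs, ∀ c ∈ g, c ≠ '-' := fun g hgm c hc => valid_ne_dash ((hgood g hgm).2 c hc)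
    have hsp2 : (p, r) = (['N', 'P'], gs) := by
      rw [← hsp, hcs, sSplit_append ['N', 'P'] _ (by simp), sSplit_flat gs hne]
      simp
    injection hsp2 with hp hr
    subst hp; subst hr
    rw [show s.toList.isEmpty = false from by rw [hcs]; simp]
    simp only [Bool.false_eq_true, if_false]
    rw [show ((r.length + 1 != 5 || (some (['N', 'P'] : List Char) : Option (List Char)) != some ['N', 'P']) = false) from by simp [hlen4]]
    simp only [Bool.false_eq_true, if_false, List.all_eq_true]
    intro g hg
    have h4 := (hgood g hg).1
    have hv := (hgood g hg).2
    rw [show (g.length != 4) = false from by simp [h4]]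
    simp only [Bool.false_eq_true, if_false]
    exact List.all_eq_true.mpr hv

lemma vc_iff (c : Char) :
    (PySem.Set.ofList "ABCDEFGHJKLMNPQRSTUVWXYZ23456789".toList).contains c = true ↔ c ∈ ("ABCDEFGHJKLMNPQRSTUVWXYZ23456789".toList : List Char) := by
  simp [PySem.Set.mem_ofList]

lemma list_len22 (l : List Char) (h : l.length = 22) :
    ∃ a0 a1 a2 a3 a4 a5 a6 a7 a8 a9 a10 a11 a12 a13 a14 a15 a16 a17 a18 a19 a20 a21 : Char, l = [a0, a1, a2, a3, a4, a5, a6, a7, a8, a9, a10, a11, a12, a13, a14, a15, a16, a17, a18, a19, a20, a21] := by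
  rcases l with _|⟨a0, _|⟨a1, _|⟨a2, _|⟨a3, _|⟨a4, _|⟨a5, _|⟨a6, _|⟨a7, _|⟨a8, _|⟨a9, _|⟨a10, _|⟨a11, _|⟨a12, _|⟨a13, _|⟨a14, _|⟨a15, _|⟨a16, _|⟨a17, _|⟨a18, _|⟨a19, _|⟨a20, _|⟨a21, _|⟨a22, l'⟩⟩⟩⟩⟩⟩⟩⟩⟩⟩⟩⟩⟩⟩⟩⟩⟩⟩⟩⟩⟩⟩⟩
  all_goals first
    | (exact ⟨a0, a1, a2, a3, a4, a5, a6, a7, a8, a9, a10, a11, a12, a13, a14, a15, a16, a17, a18, a19, a20, a21, rfl⟩)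
    | (exfalso; simp at h)

lemma list_len4 (l : List Char) (h : l.length = 4) :
    ∃ x0 x1 x2 x3 : Char, l = [x0, x1, x2, x3] := by
  rcases l with _|⟨x0, _|⟨x1, _|⟨x2, _|⟨x3, _|⟨x4, l2⟩⟩⟩⟩⟩
  all_goals first
    | (exact ⟨x0, x1, x2, x3, rfl⟩)
    | (exfalso; simp at h)

lemma B_concrete (s : String) (a0 a1 a2 a3 a4 a5 a6 a7 a8 a9 a10 a11 a12 a13 a14 a15 a16 a17 a18 a19 a20 a21 : Char)
    (hcs : s.toList = [a0, a1, a2, a3, a4, a5, a6, a7, a8, a9, a10, a11, a12, a13, a14, a15, a16, a17, a18, a19, a20, a21]) :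
    validate_license_structure_alt s = true ↔ (a0 = 'N' ∧ a1 = 'P' ∧ a2 = '-' ∧ a7 = '-' ∧ a12 = '-' ∧ a17 = '-' ∧ a3 ∈ ("ABCDEFGHJKLMNPQRSTUVWXYZ23456789".toList : List Char) ∧ a4 ∈ ("ABCDEFGHJKLMNPQRSTUVWXYZ23456789".toList : List Char) ∧ a5 ∈ ("ABCDEFGHJKLMNPQRSTUVWXYZ23456789".toList : List Char) ∧ a6 ∈ ("ABCDEFGHJKLMNPQRSTUVWXYZ23456789".toList : List Char) ∧ a8 ∈ ("ABCDEFGHJKLMNPQRSTUVWXYZ23456789".toList : List Char) ∧ a9 ∈ ("ABCDEFGHJKLMNPQRSTUVWXYZ23456789".toList : List Char) ∧ a10 ∈ ("ABCDEFGHJKLMNPQRSTUVWXYZ23456789".toList : List Char) ∧ a11 ∈ ("ABCDEFGHJKLMNPQRSTUVWXYZ23456789".toList : List Char) ∧ a13 ∈ ("ABCDEFGHJKLMNPQRSTUVWXYZ23456789".toList : List Char) ∧ a14 ∈ ("ABCDEFGHJKLMNPQRSTUVWXYZ23456789".toList : List Char) ∧ a15 ∈ ("ABCDEFGHJKLMNPQRSTUVWXYZ23456789".toList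 : List Char) ∧ a16 ∈ ("ABCDEFGHJKLMNPQRSTUVWXYZ23456789".toList : List Char) ∧ a18 ∈ ("ABCDEFGHJKLMNPQRSTUVWXYZ23456789".toList : List Char) ∧ a19 ∈ ("ABCDEFGHJKLMNPQRSTUVWXYZ23456789".toList : List Char) ∧ a20 ∈ ("ABCDEFGHJKLMNPQRSTUVWXYZ23456789".toList : List Char) ∧ a21 ∈ ("ABCDEFGHJKLMNPQRSTUVWXYZ23456789".toList : List Char)) := by
  unfold validate_license_structure_alt
  rw [hcs]
  simp only [List.isEmpty_cons, Bool.false_eq_true, if_false, Bool.and_eq_true, beq_iff_eq,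
    List.all_eq_true]
  constructor
  · rintro ⟨⟨⟨hlen, hN⟩, hP⟩, hall⟩
    norm_num [PySem.List.pyGet?, PySem.List.pyIdx?] at hN hP
    have h2 := hall 2 (by rw [PySem.List.mem_pyRange_one]; norm_num)
    rw [show PySem.Int.mod 2 5 = 2 from by rw [PySem.Int.mod_eq_emod_of_pos] <;> norm_num] at h2
    norm_num [PySem.List.pyGet?, PySem.List.pyIdx?, vc_iff] at h2
    have h3 := hall 3 (by rw [PySem.List.mem_pyRange_one]; norm_num)
    rw [show PySem.Int.mod 3 5 = 3 from by rw [PySem.Int.mod_eq_emod_of_pos] <;> norm_num] at h3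
    norm_num [PySem.List.pyGet?, PySem.List.pyIdx?, vc_iff] at h3
    have h4 := hall 4 (by rw [PySem.List.mem_pyRange_one]; norm_num)
    rw [show PySem.Int.mod 4 5 = 4 from by rw [PySem.Int.mod_eq_emod_of_pos] <;> norm_num] at h4
    norm_num [PySem.List.pyGet?, PySem.List.pyIdx?, vc_iff] at h4
    have h5 := hall 5 (by rw [PySem.List.mem_pyRange_one]; norm_num)
    rw [show PySem.Int.mod 5 5 = 0 from by rw [PySem.Int.mod_eq_emod_of_pos] <;> norm_num] at h5
    norm_num [PySem.List.pyGet?, PySem.List.pyIdx?, vc_iff] at h5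
    have h6 := hall 6 (by rw [PySem.List.mem_pyRange_one]; norm_num)
    rw [show PySem.Int.mod 6 5 = 1 from by rw [PySem.Int.mod_eq_emod_of_pos] <;> norm_num] at h6
    norm_num [PySem.List.pyGet?, PySem.List.pyIdx?, vc_iff] at h6
    have h7 := hall 7 (by rw [PySem.List.mem_pyRange_one]; norm_num)
    rw [show PySem.Int.mod 7 5 = 2 from by rw [PySem.Int.mod_eq_emod_of_pos] <;> norm_num] at h7
    norm_num [PySem.List.pyGet?, PySem.List.pyIdx?, vc_iff] at h7
    have h8 := hall 8 (by rw [PySem.List.mem_pyRange_one]; norm_num)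
    rw [show PySem.Int.mod 8 5 = 3 from by rw [PySem.Int.mod_eq_emod_of_pos] <;> norm_num] at h8
    norm_num [PySem.List.pyGet?, PySem.List.pyIdx?, vc_iff] at h8
    have h9 := hall 9 (by rw [PySem.List.mem_pyRange_one]; norm_num)
    rw [show PySem.Int.mod 9 5 = 4 from by rw [PySem.Int.mod_eq_emod_of_pos] <;> norm_num] at h9
    norm_num [PySem.List.pyGet?, PySem.List.pyIdx?, vc_iff] at h9
    have h10 := hall 10 (by rw [PySem.List.mem_pyRange_one]; norm_num)
    rw [show PySem.Int.mod 10 5 = 0 from by rw [PySem.Int.mod_eq_emod_of_pos] <;> norm_num] at h10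
    norm_num [PySem.List.pyGet?, PySem.List.pyIdx?, vc_iff] at h10
    have h11 := hall 11 (by rw [PySem.List.mem_pyRange_one]; norm_num)
    rw [show PySem.Int.mod 11 5 = 1 from by rw [PySem.Int.mod_eq_emod_of_pos] <;> norm_num] at h11
    norm_num [PySem.List.pyGet?, PySem.List.pyIdx?, vc_iff] at h11
    have h12 := hall 12 (by rw [PySem.List.mem_pyRange_one]; norm_num)
    rw [show PySem.Int.mod 12 5 = 2 from by rw [PySem.Int.mod_eq_emod_of_pos] <;> norm_num] at h12
    norm_num [PySem.List.pyGet?, PySem.List.pyIdx?, vc_iff] at h12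
    have h13 := hall 13 (by rw [PySem.List.mem_pyRange_one]; norm_num)
    rw [show PySem.Int.mod 13 5 = 3 from by rw [PySem.Int.mod_eq_emod_of_pos] <;> norm_num] at h13
    norm_num [PySem.List.pyGet?, PySem.List.pyIdx?, vc_iff] at h13
    have h14 := hall 14 (by rw [PySem.List.mem_pyRange_one]; norm_num)
    rw [show PySem.Int.mod 14 5 = 4 from by rw [PySem.Int.mod_eq_emod_of_pos] <;> norm_num] at h14
    norm_num [PySem.List.pyGet?, PySem.List.pyIdx?, vc_iff] at h14
    have h15 := hall 15 (by rw [PySem.List.mem_pyRange_one]; norm_num)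
    rw [show PySem.Int.mod 15 5 = 0 from by rw [PySem.Int.mod_eq_emod_of_pos] <;> norm_num] at h15
    norm_num [PySem.List.pyGet?, PySem.List.pyIdx?, vc_iff] at h15
    have h16 := hall 16 (by rw [PySem.List.mem_pyRange_one]; norm_num)
    rw [show PySem.Int.mod 16 5 = 1 from by rw [PySem.Int.mod_eq_emod_of_pos] <;> norm_num] at h16
    norm_num [PySem.List.pyGet?, PySem.List.pyIdx?, vc_iff] at h16
    have h17 := hall 17 (by rw [PySem.List.mem_pyRange_one]; norm_num)
    rw [show PySem.Int.mod 17 5 = 2 from by rw [PySem.Int.mod_eq_emod_of_pos] <;> norm_num] at h17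
    norm_num [PySem.List.pyGet?, PySem.List.pyIdx?, vc_iff] at h17
    have h18 := hall 18 (by rw [PySem.List.mem_pyRange_one]; norm_num)
    rw [show PySem.Int.mod 18 5 = 3 from by rw [PySem.Int.mod_eq_emod_of_pos] <;> norm_num] at h18
    norm_num [PySem.List.pyGet?, PySem.List.pyIdx?, vc_iff] at h18
    have h19 := hall 19 (by rw [PySem.List.mem_pyRange_one]; norm_num)
    rw [show PySem.Int.mod 19 5 = 4 from by rw [PySem.Int.mod_eq_emod_of_pos] <;> norm_num] at h19
    norm_num [PySem.List.pyGet?, PySem.List.pyIdx?, vc_iff] at h19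
    have h20 := hall 20 (by rw [PySem.List.mem_pyRange_one]; norm_num)
    rw [show PySem.Int.mod 20 5 = 0 from by rw [PySem.Int.mod_eq_emod_of_pos] <;> norm_num] at h20
    norm_num [PySem.List.pyGet?, PySem.List.pyIdx?, vc_iff] at h20
    have h21 := hall 21 (by rw [PySem.List.mem_pyRange_one]; norm_num)
    rw [show PySem.Int.mod 21 5 = 1 from by rw [PySem.Int.mod_eq_emod_of_pos] <;> norm_num] at h21
    norm_num [PySem.List.pyGet?, PySem.List.pyIdx?, vc_iff] at h21
    exact ⟨hN, hP, h2, h7, h12, h17, h3, h4, h5, h6, h8, h9, h10, h11, h13, h14, h15, h16, h18, h19, h20, h21⟩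
  · rintro ⟨hN, hP, hd1, hd2, hd3, hd4, h3, h4, h5, h6, h8, h9, h10, h11, h13, h14, h15, h16, h18, h19, h20, h21⟩
    subst hN; subst hP; subst hd1; subst hd2; subst hd3; subst hd4
    refine ⟨⟨⟨rfl, by norm_num [PySem.List.pyGet?, PySem.List.pyIdx?]⟩,
      by norm_num [PySem.List.pyGet?, PySem.List.pyIdx?]⟩, ?_⟩
    intro i him
    rw [PySem.List.mem_pyRange_one] at him
    obtain ⟨hb1, hb2⟩ := him
    interval_cases i <;>
      rw [PySem.Int.mod_eq_emod_of_pos (show (0:Int) < 5 by norm_num)] <;>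
      norm_num [PySem.List.pyGet?, PySem.List.pyIdx?, vc_iff] <;>
      first | assumption | rfl

lemma B_iff (s : String) : validate_license_structure_alt s = true ↔ Shape s.toList := by
  constructor
  · intro h
    have hlen : s.toList.length = 22 := by
      unfold validate_license_structure_alt at h
      rcases hcs : s.toList with _ | ⟨ch, t⟩
      · rw [hcs] at h; simp at h
      · rw [hcs] at h
        simp only [List.isEmpty_cons, Bool.false_eq_true, if_false, Bool.and_eq_true,
          beq_iff_eq] at h
        exact h.1.1.1
    obtain ⟨a0, a1, a2, a3, a4, a5, a6, a7, a8, a9, a10, a11, a12, a13, a14, a15, a16, a17, a18, a19, a20, a21, hcs⟩ := list_len22 _ hlen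
    rw [B_concrete s a0 a1 a2 a3 a4 a5 a6 a7 a8 a9 a10 a11 a12 a13 a14 a15 a16 a17 a18 a19 a20 a21 hcs] at h
    obtain ⟨hN, hP, hd2, hd7, hd12, hd17, h3, h4, h5, h6, h8, h9, h10, h11, h13, h14, h15, h16, h18, h19, h20, h21⟩ := h
    subst hN; subst hP; subst hd2; subst hd7; subst hd12; subst hd17
    refine ⟨[[a3, a4, a5, a6], [a8, a9, a10, a11], [a13, a14, a15, a16], [a18, a19, a20, a21]], by rw [hcs]; rfl, rfl, ?_⟩
    intro g hg
    simp only [List.mem_cons, List.not_mem_nil, or_false] at hg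
    rcases hg with rfl | rfl | rfl | rfl <;>
      exact ⟨rfl, by
        intro ch hch
        simp only [List.mem_cons, List.not_mem_nil, or_false] at hch
        rw [vc_iff]
        rcases hch with rfl | rfl | rfl | rfl <;> assumption⟩
  · rintro ⟨gs, hcs, hlen4, hgood⟩
    rcases gs with _|⟨g1, _|⟨g2, _|⟨g3, _|⟨g4, _|⟨g5, r⟩⟩⟩⟩⟩
    all_goals try (exfalso; simp at hlen4; done)
    obtain ⟨b0, b1, b2, b3, rfl⟩ := list_len4 g1 (hgood g1 (by simp)).1
    obtain ⟨c0, c1, c2, c3, rfl⟩ := list_len4 g2 (hgood g2 (by simp)).1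
    obtain ⟨d0, d1, d2, d3, rfl⟩ := list_len4 g3 (hgood g3 (by simp)).1
    obtain ⟨e0, e1, e2, e3, rfl⟩ := list_len4 g4 (hgood g4 (by simp)).1
    simp only [List.map_cons, List.map_nil, List.flatten_cons, List.flatten_nil,
      List.cons_append, List.nil_append, List.append_nil] at hcs
    rw [B_concrete s 'N' 'P' '-' b0 b1 b2 b3 '-' c0 c1 c2 c3 '-' d0 d1 d2 d3 '-' e0 e1 e2 e3 hcs]
    exact ⟨rfl, rfl, rfl, rfl, rfl, rfl,
      (vc_iff b0).mp ((hgood [b0, b1, b2, b3] (by simp)).2 b0 (by simp)),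
      (vc_iff b1).mp ((hgood [b0, b1, b2, b3] (by simp)).2 b1 (by simp)),
      (vc_iff b2).mp ((hgood [b0, b1, b2, b3] (by simp)).2 b2 (by simp)),
      (vc_iff b3).mp ((hgood [b0, b1, b2, b3] (by simp)).2 b3 (by simp)),
      (vc_iff c0).mp ((hgood [c0, c1, c2, c3] (by simp)).2 c0 (by simp)),
      (vc_iff c1).mp ((hgood [c0, c1, c2, c3] (by simp)).2 c1 (by simp)),
      (vc_iff c2).mp ((hgood [c0, c1, c2, c3] (by simp)).2 c2 (by simp)),
      (vc_iff c3).mp ((hgood [c0, c1, c2, c3] (by simp)).2 c3 (by simp)),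
      (vc_iff d0).mp ((hgood [d0, d1, d2, d3] (by simp)).2 d0 (by simp)),
      (vc_iff d1).mp ((hgood [d0, d1, d2, d3] (by simp)).2 d1 (by simp)),
      (vc_iff d2).mp ((hgood [d0, d1, d2, d3] (by simp)).2 d2 (by simp)),
      (vc_iff d3).mp ((hgood [d0, d1, d2, d3] (by simp)).2 d3 (by simp)),
      (vc_iff e0).mp ((hgood [e0, e1, e2, e3] (by simp)).2 e0 (by simp)),
      (vc_iff e1).mp ((hgood [e0, e1, e2, e3] (by simp)).2 e1 (by simp)),
      (vc_iff e2).mp ((hgood [e0, e1, e2, e3] (by simp)).2 e2 (by simp)),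
      (vc_iff e3).mp ((hgood [e0, e1, e2, e3] (by simp)).2 e3 (by simp))⟩

-- ===== VERDICT (by name: the statement is the Claim_ definition above) =====
theorem validate_license_structure_spec : Claim_equal_validate_license_structure := by
  intro s _
  unfold Spec_validate_license_structure
  have h := (A_iff s).trans (B_iff s).symm
  cases hA : validate_license_structure s <;> cases hB : validate_license_structure_alt s <;> simp_all
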